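-- pv_equiv track=rewrite | github.com/mamrhein/identifiers | src/identifiers/euvatid.py | check_bg_9d
-- ===== SOURCE A (Python) =====
-- from typing import Callable, Dict, Match, Optional, Pattern, Tuple
--
-- def check_bg_9d(base: str, add: Optional[str] = None) -> str:
--     """Check country specific VAT-Id"""
--     weights = (1, 2, 3, 4, 5, 6, 7, 8)
--     s = sum(w * int(c) for w, c in zip(weights, base))
--     r = s % 11
--     if r < 10:
--         return str(r)
--     weights = (3, 4, 5, 6, 7, 8, 9, 10)
--     s = sum(w * int(c) for w, c in zip(weights, base))
--     r = s % 11
--     return str(r % 10)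
-- ===== SOURCE B (Python) =====
-- from typing import Optional
--
-- def check_bg_9d(base: str, add: Optional[str] = None) -> str:
--     """Check country specific VAT-Id"""
--     s = d = 0
--     for w, c in zip((1, 2, 3, 4, 5, 6, 7, 8), base):
--         v = int(c)
--         s += w * v
--         d += v
--     r = s % 11
--     if r < 10:
--         return str(r)
--     # second weight tuple (3..10) = first + 2, so its sum is s + 2*d
--     return str((s + 2 * d) % 11 % 10)
-- ===== Notes on version B (the rewrite author's own statement) =====
-- stated objective: alternative
-- what changed: One pass accumulating both the weighted sum s and the plain digit sum d over the same zip-truncated positions; the second weighted sum is recovered arithmetically as s + 2*d instead of a second generator pass.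
import Mathlib
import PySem

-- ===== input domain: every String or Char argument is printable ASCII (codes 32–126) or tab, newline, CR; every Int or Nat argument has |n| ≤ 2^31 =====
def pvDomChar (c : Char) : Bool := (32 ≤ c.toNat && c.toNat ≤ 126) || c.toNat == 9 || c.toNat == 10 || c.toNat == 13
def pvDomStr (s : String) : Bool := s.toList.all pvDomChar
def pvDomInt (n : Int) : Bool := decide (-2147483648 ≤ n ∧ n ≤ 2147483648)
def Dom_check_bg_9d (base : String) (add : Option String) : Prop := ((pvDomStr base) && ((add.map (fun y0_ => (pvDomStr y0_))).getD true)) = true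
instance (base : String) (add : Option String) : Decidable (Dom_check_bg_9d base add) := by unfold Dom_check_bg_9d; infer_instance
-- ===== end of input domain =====

-- B merges A's two weighted passes into one pass that also accumulates the plain digit sum d,
-- recovering the second weighted sum as s + 2*d (alternative decomposition; same cost).

-- int(c) for a single character c (exact where Python returns; Pre_ excludes the ValueError cases)
def pvInt1 (c : Char) : Int := (PySem.Int.ofStr? (String.mk [c])).getD 0

-- ===== PORT A =====
def check_bg_9d (base : String) (add : Option String) : String :=
  let weights : List Int := [1, 2, 3, 4, 5, 6, 7, 8]
  let s := ((List.zip weights base.toList).map (fun p => p.1 * pvInt1 p.2)).sum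
  let r := PySem.Int.mod s 11
  if r < 10 then PySem.Int.toStr r
  else
    let weights2 : List Int := [3, 4, 5, 6, 7, 8, 9, 10]
    let s2 := ((List.zip weights2 base.toList).map (fun p => p.1 * pvInt1 p.2)).sum
    let r2 := PySem.Int.mod s2 11
    PySem.Int.toStr (PySem.Int.mod r2 10)

-- ===== PORT B =====
def check_bg_9d_alt (base : String) (add : Option String) : String :=
  let sd := (List.zip ([1, 2, 3, 4, 5, 6, 7, 8] : List Int) base.toList).foldl
      (fun (acc : Int × Int) p => let v := pvInt1 p.2; (acc.1 + p.1 * v, acc.2 + v)) (0, 0)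
  let r := PySem.Int.mod sd.1 11
  if r < 10 then PySem.Int.toStr r
  else PySem.Int.toStr (PySem.Int.mod (PySem.Int.mod (sd.1 + 2 * sd.2) 11) 10)

-- ===== PRECONDITION & SPEC =====
-- Python's int(c) raises ValueError on any non-digit among the first min(len, 8) characters
def Pre_check_bg_9d (base : String) (add : Option String) : Prop :=
  ((base.toList.take 8).all Char.isDigit) = true
instance (base : String) (add : Option String) : Decidable (Pre_check_bg_9d base add) := by
  unfold Pre_check_bg_9d; infer_instance
def pvWitness_check_bg_9d : String × Option String := ("175074752", none)

def Spec_check_bg_9d (base : String) (add : Option String) (out : String) : Prop := out = check_bg_9d_alt base add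
instance (base : String) (add : Option String) (out : String) : Decidable (Spec_check_bg_9d base add out) := by unfold Spec_check_bg_9d; infer_instance

-- ===== CLAIM (what is proved, stated in full; the proofs are below) =====
def Claim_equal_check_bg_9d : Prop := ∀ (base : String) (add : Option String), Dom_check_bg_9d base add → Pre_check_bg_9d base add → Spec_check_bg_9d base add (check_bg_9d base add)

-- ===== LEMMAS AND PROOFS =====

-- B's pair-fold computes (Σ w·v, Σ v) over the zipped list
theorem pair_fold_eq (l : List (Int × Char)) (a b : Int) :
    l.foldl (fun (acc : Int × Int) p => let v := pvInt1 p.2; (acc.1 + p.1 * v, acc.2 + v)) (a, b)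
      = (a + (l.map (fun p => p.1 * pvInt1 p.2)).sum, b + (l.map (fun p => pvInt1 p.2)).sum) := by
  induction l generalizing a b with
  | nil => simp
  | cons x xs ih => simp [List.foldl_cons, ih]; constructor <;> ring

-- A's second weighted sum equals s + 2·d
theorem second_sum_eq (cs : List Char) :
    ((List.zip ([3, 4, 5, 6, 7, 8, 9, 10] : List Int) cs).map (fun p => p.1 * pvInt1 p.2)).sum
      = ((List.zip ([1, 2, 3, 4, 5, 6, 7, 8] : List Int) cs).map (fun p => p.1 * pvInt1 p.2)).sum
        + 2 * ((List.zip ([1, 2, 3, 4, 5, 6, 7, 8] : List Int) cs).map (fun p => pvInt1 p.2)).sum := by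
  have h : ([3, 4, 5, 6, 7, 8, 9, 10] : List Int)
      = ([1, 2, 3, 4, 5, 6, 7, 8] : List Int).map (fun w => w + 2) := by decide
  rw [h, List.zip_map_left]
  generalize List.zip ([1, 2, 3, 4, 5, 6, 7, 8] : List Int) cs = l
  induction l with
  | nil => simp
  | cons x xs ih => simp [Function.comp_def, Prod.map] at ih ⊢; rw [ih]; ring

-- ===== VERDICT (by name: the statement is the Claim_ definition above) =====
theorem check_bg_9d_spec : Claim_equal_check_bg_9d := by
  intro base add _ _
  unfold Spec_check_bg_9d check_bg_9d check_bg_9d_alt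
  rw [pair_fold_eq]
  simp only [zero_add]
  split_ifs with h
  · rfl
  · rw [second_sum_eq]
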